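-- pv_equiv track=rewrite | github.com/thhuang/algo4fun | solutions/leetcode/special-array-ii/main.py | getSpecialIntervals
-- ===== SOURCE A (Python) =====
-- from typing import List, Tuple
--
-- def getSpecialIntervals(nums: List[int]) -> List[Tuple[int, int]]:
--     result = []
--
--     l = 0
--     while l < len(nums):
--         r = l + 1
--         while r < len(nums) and (nums[r - 1] + nums[r]) % 2 == 1:
--             r += 1
--         result.append((l, r - 1))
--         l = r
--
--     return result
-- ===== SOURCE B (Python) =====
-- from typing import List, Tuple
--
-- def getSpecialIntervals(nums: List[int]) -> List[Tuple[int, int]]: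
--     if not nums:
--         return []
--     n = len(nums)
--     breaks = [i for i in range(1, n) if (nums[i - 1] + nums[i]) % 2 == 0]
--     boundaries = [0] + breaks + [n]
--     return [(a, b - 1) for a, b in zip(boundaries, boundaries[1:])]
-- ===== Notes on version B (the rewrite author's own statement) =====
-- stated objective: alternative
-- what changed: Replaces the two-pointer nested while loops by a boundary table: one pass collects the break positions (adjacent same-parity pairs), then consecutive boundaries are zipped into intervals.
import Mathlib
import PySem

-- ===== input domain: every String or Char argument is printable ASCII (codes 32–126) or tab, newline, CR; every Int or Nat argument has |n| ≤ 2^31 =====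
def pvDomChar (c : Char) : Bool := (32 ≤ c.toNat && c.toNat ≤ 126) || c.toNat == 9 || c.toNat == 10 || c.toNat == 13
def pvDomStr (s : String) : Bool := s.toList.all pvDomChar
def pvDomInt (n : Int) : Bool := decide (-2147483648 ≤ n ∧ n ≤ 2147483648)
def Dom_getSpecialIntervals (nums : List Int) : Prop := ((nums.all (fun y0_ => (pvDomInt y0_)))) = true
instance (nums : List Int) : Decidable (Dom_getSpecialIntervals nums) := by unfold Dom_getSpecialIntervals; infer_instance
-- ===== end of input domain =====

-- B replaces A's two-pointer nested while loops by a boundary table (break positions, then zipped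
-- consecutive boundaries); same O(n) cost, equivalence proved for the return value on all inputs.

-- ===== PORT A =====
-- inner while loop: advance r while r < len(nums) and (nums[r-1] + nums[r]) % 2 == 1
def pvInnerA (nums : List Int) (r : Nat) : Nat :=
  if r < nums.length ∧ (nums.getD (r - 1) 0 + nums.getD r 0) % 2 = 1 then
    pvInnerA nums (r + 1)
  else r
termination_by nums.length - r
decreasing_by omega

theorem pvInnerA_ge (nums : List Int) (r : Nat) : r ≤ pvInnerA nums r := by
  unfold pvInnerA
  split
  · have := pvInnerA_ge nums (r + 1); omega
  · exact le_refl r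
termination_by nums.length - r
decreasing_by omega

-- outer while loop over l
def pvLoopA (nums : List Int) (l : Nat) : List (Int × Int) :=
  if h : l < nums.length then
    let r := pvInnerA nums (l + 1)
    ((l : Int), (r : Int) - 1) :: pvLoopA nums r
  else []
termination_by nums.length - l
decreasing_by
  have := pvInnerA_ge nums (l + 1); omega

def getSpecialIntervals (nums : List Int) : List (Int × Int) :=
  pvLoopA nums 0

-- ===== PORT B =====
def getSpecialIntervals_alt (nums : List Int) : List (Int × Int) :=
  if nums = [] then []
  else
    let n := nums.length
    let breaks := (List.range' 1 (n - 1) 1).filter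
      (fun i => decide ((nums.getD (i - 1) 0 + nums.getD i 0) % 2 = 0))
    let boundaries := 0 :: (breaks ++ [n])
    (boundaries.zip boundaries.tail).map (fun p => ((p.1 : Int), (p.2 : Int) - 1))

-- ===== PRECONDITION & SPEC =====
def Spec_getSpecialIntervals (nums : List Int) (out : List (Int × Int)) : Prop := out = getSpecialIntervals_alt nums
instance (nums : List Int) (out : List (Int × Int)) : Decidable (Spec_getSpecialIntervals nums out) := by unfold Spec_getSpecialIntervals; infer_instance

-- ===== CLAIM (what is proved, stated in full; the proofs are below) =====
def Claim_equal_getSpecialIntervals : Prop := ∀ (nums : List Int), Dom_getSpecialIntervals nums → Spec_getSpecialIntervals nums (getSpecialIntervals nums)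

-- ===== LEMMAS AND PROOFS =====

-- break positions of nums: i with 1 ≤ i < n and nums[i-1] + nums[i] even
def pvBreaks (nums : List Int) : List Nat :=
  (List.range' 1 (nums.length - 1) 1).filter
    (fun i => decide ((nums.getD (i - 1) 0 + nums.getD i 0) % 2 = 0))

-- intervals from a start l, a list of inner boundaries, and the end n
def pvPairs (n : Nat) (l : Nat) (L : List Nat) : List (Int × Int) :=
  match L with
  | [] => [((l : Int), (n : Int) - 1)]
  | b :: bs => ((l : Int), (b : Int) - 1) :: pvPairs n b bs

theorem pvBreaks_mem (nums : List Int) (i : Nat) (h : i ∈ pvBreaks nums) :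
    1 ≤ i ∧ i < nums.length ∧ (nums.getD (i - 1) 0 + nums.getD i 0) % 2 = 0 := by
  unfold pvBreaks at h
  rw [List.mem_filter] at h
  obtain ⟨h1, h2⟩ := h
  rw [List.mem_range'_1] at h1
  rw [decide_eq_true_eq] at h2
  exact ⟨by omega, by omega, h2⟩

theorem pvBreaks_sorted (nums : List Int) : (pvBreaks nums).Pairwise (· < ·) := by
  unfold pvBreaks
  exact List.Pairwise.sublist List.filter_sublist List.pairwise_lt_range'

theorem filter_ge_of_sorted (L : List Nat) (hs : L.Pairwise (· < ·)) (r b : Nat)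
    (bs : List Nat) (h : L.filter (fun i => decide (r ≤ i)) = b :: bs) :
    b ∈ L ∧ r ≤ b ∧ bs = L.filter (fun i => decide (b + 1 ≤ i)) := by
  induction L with
  | nil => simp at h
  | cons x xs ih =>
    rw [List.pairwise_cons] at hs
    by_cases hrx : r ≤ x
    · rw [List.filter_cons_of_pos (by simpa using hrx)] at h
      injection h with h1 h2
      subst h1
      refine ⟨List.mem_cons_self, hrx, ?_⟩
      rw [List.filter_cons_of_neg (by simp), ← h2]
      apply List.filter_congr
      intro y hy
      have := hs.1 y hy
      simp; omega
    · rw [List.filter_cons_of_neg (by simpa using hrx)] at h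
      obtain ⟨hb, hrb, hbs⟩ := ih hs.2 h
      refine ⟨List.mem_cons_of_mem _ hb, hrb, ?_⟩
      rw [hbs, List.filter_cons_of_neg]
      have := hs.1 b hb
      simp
      omega

theorem filter_head_of_mem (L : List Nat) (hs : L.Pairwise (· < ·)) (r : Nat) (hr : r ∈ L) :
    ∃ bs, L.filter (fun i => decide (r ≤ i)) = r :: bs := by
  induction L with
  | nil => simp at hr
  | cons x xs ih =>
    rw [List.pairwise_cons] at hs
    rcases List.mem_cons.mp hr with h | h
    · subst h
      exact ⟨_, List.filter_cons_of_pos (by simp)⟩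
    · have hxr : x < r := hs.1 r h
      rw [List.filter_cons_of_neg (by simp; omega)]
      exact ih hs.2 h

-- characterization of the inner while loop via pvBreaks
theorem pvInnerA_eq (nums : List Int) (r : Nat) (h1 : 1 ≤ r) (h2 : r ≤ nums.length) :
    pvInnerA nums r =
      (match (pvBreaks nums).filter (fun i => decide (r ≤ i)) with
       | [] => nums.length
       | b :: _ => b) := by
  unfold pvInnerA
  split
  · rename_i hc
    obtain ⟨hrn, hodd⟩ := hc
    have hnb : ¬ ((nums.getD (r - 1) 0 + nums.getD r 0) % 2 = 0) := by omega
    have hfe : (pvBreaks nums).filter (fun i => decide (r ≤ i))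
             = (pvBreaks nums).filter (fun i => decide (r + 1 ≤ i)) := by
      apply List.filter_congr
      intro i hi
      have hm := pvBreaks_mem nums i hi
      have : i ≠ r := by
        intro he; exact hnb (he ▸ hm.2.2)
      simp; omega
    rw [hfe]
    exact pvInnerA_eq nums (r + 1) (by omega) (by omega)
  · rename_i hc
    push Not at hc
    by_cases hrn : r < nums.length
    · have hev : (nums.getD (r - 1) 0 + nums.getD r 0) % 2 = 0 := by
        have := hc hrn
        have := Int.emod_two_eq (nums.getD (r - 1) 0 + nums.getD r 0)
        omega
      have hrm : r ∈ pvBreaks nums := by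
        unfold pvBreaks
        rw [List.mem_filter, List.mem_range'_1]
        constructor
        · omega
        · simpa using hev
      obtain ⟨bs, hbs⟩ := filter_head_of_mem _ (pvBreaks_sorted nums) r hrm
      rw [hbs]
    · have hre : r = nums.length := by omega
      have : (pvBreaks nums).filter (fun i => decide (r ≤ i)) = [] := by
        rw [List.filter_eq_nil_iff]
        intro i hi
        have := pvBreaks_mem nums i hi
        simp; omega
      rw [this, hre]
termination_by nums.length - r
decreasing_by omega

-- characterization of the outer loop
theorem pvLoopA_eq (nums : List Int) (l : Nat) (h : l < nums.length) :
    pvLoopA nums l = pvPairs nums.length l ((pvBreaks nums).filter (fun i => decide (l + 1 ≤ i))) := by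
  rw [pvLoopA]
  rw [dif_pos h]
  have hinner := pvInnerA_eq nums (l + 1) (by omega) (by omega)
  cases hfl : (pvBreaks nums).filter (fun i => decide (l + 1 ≤ i)) with
  | nil =>
    rw [hfl] at hinner
    simp only [hinner]
    rw [pvLoopA, dif_neg (by omega)]
    rfl
  | cons b bs =>
    rw [hfl] at hinner
    simp only [hinner]
    obtain ⟨hbm, hlb, hbs⟩ := filter_ge_of_sorted _ (pvBreaks_sorted nums) (l + 1) b bs hfl
    have hbn : b < nums.length := (pvBreaks_mem nums b hbm).2.1
    rw [pvLoopA_eq nums b hbn]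
    rw [pvPairs, ← hbs]
termination_by nums.length - l
decreasing_by omega

-- B's zip-map over boundaries computes pvPairs
theorem zip_map_eq_pairs (n : Nat) (l : Nat) (L : List Nat) :
    (((l :: (L ++ [n])).zip (L ++ [n])).map (fun p => ((p.1 : Int), (p.2 : Int) - 1)))
      = pvPairs n l L := by
  induction L generalizing l with
  | nil => rfl
  | cons b bs ih =>
    simp only [List.cons_append, List.zip_cons_cons, List.map_cons, pvPairs]
    rw [← ih b]

theorem breaks_all_ge_one (nums : List Int) :
    (pvBreaks nums).filter (fun i => decide (1 ≤ i)) = pvBreaks nums := by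
  rw [List.filter_eq_self]
  intro i hi
  have := pvBreaks_mem nums i hi
  simp; omega

-- ===== VERDICT (by name: the statement is the Claim_ definition above) =====
theorem getSpecialIntervals_spec : Claim_equal_getSpecialIntervals := by
  intro nums _
  unfold Spec_getSpecialIntervals getSpecialIntervals getSpecialIntervals_alt
  by_cases hn : nums = []
  · subst hn
    rw [pvLoopA, dif_neg (by simp)]
    simp
  · rw [if_neg hn]
    have hlen : 0 < nums.length := List.length_pos_iff.mpr hn
    rw [pvLoopA_eq nums 0 hlen]
    rw [show (fun i => decide (0 + 1 ≤ i)) = (fun i => decide (1 ≤ i)) from rfl,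
       breaks_all_ge_one]
    exact (zip_map_eq_pairs nums.length 0 (pvBreaks nums)).symm
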